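-- pv_equiv track=rewrite | github.com/Gogopel/compilator | venv/Parser.py | edit_table
-- ===== SOURCE A (Python) =====
-- def edit_table(table):
--     new_table = {}
--     index_s = 0
--     index_a = 0
--     oblast='main'
--     for i in table:
--         new_table[i[0]] = []
--         if i[2] == 'main':
--             new_table[i[0]].append('s' + str(index_s))
--             index_s = index_s + 1
--         else:
--             if (i[2] == oblast):
--                 new_table[i[0]].append('a' + str(index_a))
--                 index_a = index_a + 1
--             else:
--                 index_a = 0
--                 new_table[i[0]].append('a' + str(index_a))
--                 index_a = index_a + 1
--                 oblast = i[2]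
--         new_table[i[0]].append(i[1])
--         new_table[i[0]].append(i[2])
--     return new_table
-- ===== SOURCE B (Python) =====
-- def edit_table(table):
--     # pass 1: state labels -- one per 'main' row, in order
--     s_labels = ['s' + str(k) for k in range(sum(1 for row in table if row[2] == 'main'))]
--     # pass 2: action labels -- one per non-'main' row, resetting when the oblast changes
--     a_labels = []
--     oblast = 'main'
--     index_a = 0
--     for row in table:
--         if row[2] != 'main':
--             if row[2] != oblast:
--                 index_a = 0
--                 oblast = row[2]
--             a_labels.append('a' + str(index_a))
--             index_a += 1
--     # pass 3: merge -- consume the two label streams in original row order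
--     s_iter = iter(s_labels)
--     a_iter = iter(a_labels)
--     out = {}
--     for key, b, c in table:
--         lab = next(s_iter) if c == 'main' else next(a_iter)
--         out[key] = [lab, b, c]
--     return out
-- ===== Notes on version B (the rewrite author's own statement) =====
-- stated objective: alternative
-- what changed: A's single interleaved loop carrying a dict plus three pieces of counter state is split into two independent labelling passes (state labels enumerated from the count of 'main' rows, action labels from a pass over the non-'main' rows tracking the oblast) merged with the rows in a final pass.
import Mathlib
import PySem

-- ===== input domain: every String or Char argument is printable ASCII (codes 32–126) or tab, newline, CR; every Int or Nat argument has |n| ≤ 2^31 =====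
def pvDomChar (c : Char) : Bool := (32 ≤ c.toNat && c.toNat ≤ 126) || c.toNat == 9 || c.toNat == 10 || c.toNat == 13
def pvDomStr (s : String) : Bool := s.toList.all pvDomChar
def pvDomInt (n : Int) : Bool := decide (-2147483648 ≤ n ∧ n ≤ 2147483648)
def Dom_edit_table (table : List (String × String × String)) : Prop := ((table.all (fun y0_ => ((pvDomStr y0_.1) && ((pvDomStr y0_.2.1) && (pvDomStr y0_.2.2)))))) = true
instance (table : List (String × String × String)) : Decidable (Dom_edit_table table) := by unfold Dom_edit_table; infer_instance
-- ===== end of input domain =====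

-- B replaces A's single interleaved stateful loop by two independent labelling passes
-- (state labels from the 'main' rows, action labels from the others) merged in a final pass;
-- objective: simpler decomposition, same cost.

-- ===== PORT A =====
-- one loop step of A: insert the empty row, append the label (updating the counters/oblast),
-- then append i[1] and i[2]
def editStepA (st : PySem.Dict String (List String) × Int × Int × String)
    (i : String × String × String) : PySem.Dict String (List String) × Int × Int × String :=
  let d0 := st.1.insert i.1 []
  let r :=
    if i.2.2 == "main" then
      (d0.modify i.1 [] (· ++ ["s" ++ PySem.Int.toStr st.2.1]), st.2.1 + 1, st.2.2.1, st.2.2.2)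
    else if i.2.2 == st.2.2.2 then
      (d0.modify i.1 [] (· ++ ["a" ++ PySem.Int.toStr st.2.2.1]), st.2.1, st.2.2.1 + 1, st.2.2.2)
    else
      (d0.modify i.1 [] (· ++ ["a" ++ PySem.Int.toStr (0 : Int)]), st.2.1, (0 : Int) + 1, i.2.2)
  (((r.1.modify i.1 [] (· ++ [i.2.1])).modify i.1 [] (· ++ [i.2.2])), r.2)

def edit_table (table : List (String × String × String)) : List (String × List String) :=
  (table.foldl editStepA (PySem.Dict.empty, 0, 0, "main")).1.items

-- ===== PORT B =====
-- pass 2 step of B: on a non-'main' row, reset index_a if the oblast changed, emit the label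
def aLabStepB (st : List String × String × Int) (row : String × String × String) :
    List String × String × Int :=
  if row.2.2 != "main" then
    let p := if row.2.2 != st.2.1 then (row.2.2, (0 : Int)) else (st.2.1, st.2.2)
    (st.1 ++ ["a" ++ PySem.Int.toStr p.2], p.1, p.2 + 1)
  else st

-- pass 3 step of B: take the next label from the matching stream (next() never exhausts
-- these streams, so the default "" of headD is unreachable)
def mergeStepB (st : PySem.Dict String (List String) × List String × List String)
    (row : String × String × String) : PySem.Dict String (List String) × List String × List String :=
  if row.2.2 == "main" then
    (st.1.insert row.1 [st.2.1.headD "", row.2.1, row.2.2], st.2.1.tail, st.2.2)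
  else
    (st.1.insert row.1 [st.2.2.headD "", row.2.1, row.2.2], st.2.1, st.2.2.tail)

def edit_table_alt (table : List (String × String × String)) : List (String × List String) :=
  let mainCount : Int := table.foldl (fun n row => if row.2.2 == "main" then n + 1 else n) 0
  let sLabels := (PySem.List.pyRange 0 mainCount 1).map (fun k => "s" ++ PySem.Int.toStr k)
  let aLabels := (table.foldl aLabStepB ([], "main", 0)).1
  (table.foldl mergeStepB (PySem.Dict.empty, sLabels, aLabels)).1.items

-- ===== PRECONDITION & SPEC =====
def Spec_edit_table (table : List (String × String × String)) (out : List (String × List String)) : Prop := out = edit_table_alt table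
instance (table : List (String × String × String)) (out : List (String × List String)) : Decidable (Spec_edit_table table out) := by unfold Spec_edit_table; infer_instance

-- ===== CLAIM (what is proved, stated in full; the proofs are below) =====
def Claim_equal_edit_table : Prop := ∀ (table : List (String × String × String)), Dom_edit_table table → Spec_edit_table table (edit_table table)

-- ===== LEMMAS AND PROOFS =====

-- the action-label stream produced by B's pass 2, as a pure recursion
def aLabs : List (String × String × String) → String → Int → List String
  | [], _, _ => []
  | r :: rest, ob, ia =>
    if r.2.2 == "main" then aLabs rest ob ia
    else if r.2.2 == ob then ("a" ++ PySem.Int.toStr ia) :: aLabs rest ob (ia + 1)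
    else ("a" ++ PySem.Int.toStr (0 : Int)) :: aLabs rest r.2.2 1

-- the state-label stream, as a pure recursion
def sLabs : List (String × String × String) → Int → List String
  | [], _ => []
  | r :: rest, s =>
    if r.2.2 == "main" then ("s" ++ PySem.Int.toStr s) :: sLabs rest (s + 1)
    else sLabs rest s

theorem aLabStepB_spec (rest : List (String × String × String)) :
    ∀ (ls : List String) (ob : String) (ia : Int),
      (rest.foldl aLabStepB (ls, ob, ia)).1 = ls ++ aLabs rest ob ia := by
  induction rest with
  | nil => intro ls ob ia; simp [aLabs]
  | cons r rest ih =>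
    intro ls ob ia
    simp only [List.foldl_cons]
    by_cases hm : r.2.2 = "main"
    · simp [aLabStepB, aLabs, hm, ih]
    · by_cases ho : r.2.2 = ob
      · subst ho; simp [aLabStepB, aLabs, hm, ih]
      · simp [aLabStepB, aLabs, hm, ho, ih]

theorem mainCount_foldl (rest : List (String × String × String)) :
    ∀ (n : Int), rest.foldl (fun n row => if row.2.2 == "main" then n + 1 else n) n
      = n + (rest.countP (fun row => row.2.2 == "main") : Int) := by
  induction rest with
  | nil => intro n; simp
  | cons r rest ih =>
    intro n
    by_cases hm : (r.2.2 == "main") = true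
    · simp only [List.foldl_cons, List.countP_cons, hm, if_true, if_pos]
      rw [ih]; push_cast; ring
    · simp only [List.foldl_cons, List.countP_cons, hm, if_neg]
      rw [ih]; push_cast; ring

theorem sLabs_eq_range (rest : List (String × String × String)) :
    ∀ (s : Int),
      (PySem.List.pyRange s (s + (rest.countP (fun row => row.2.2 == "main") : Int)) 1).map
          (fun k => "s" ++ PySem.Int.toStr k)
        = sLabs rest s := by
  induction rest with
  | nil =>
    intro s
    simp [sLabs]
  | cons r rest ih =>
    intro s
    by_cases hm : (r.2.2 == "main") = true
    · have hcnt : ((r :: rest).countP (fun row => row.2.2 == "main") : Int)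
          = (rest.countP (fun row => row.2.2 == "main") : Int) + 1 := by
        simp [hm]
      have hlt : s < s + ((r :: rest).countP (fun row => row.2.2 == "main") : Int) := by
        have : (0 : Int) ≤ (rest.countP (fun row => row.2.2 == "main") : Int) := Int.natCast_nonneg _
        omega
      rw [PySem.List.pyRange_one_cons hlt, List.map_cons]
      simp only [sLabs, hm, if_true]
      congr 1
      rw [hcnt, show s + ((rest.countP (fun row => row.2.2 == "main") : Int) + 1)
          = (s + 1) + (rest.countP (fun row => row.2.2 == "main") : Int) by ring]
      exact ih (s + 1)
    · simp only [sLabs, hm, if_false, List.countP_cons, Bool.false_eq_true]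
      simpa [hm] using ih s

-- the key dict fact: appending right after (re)inserting the key is an insert of the appended list
theorem modify_insert_self {ν : Type} (d : PySem.Dict String ν) (k : String) (v : ν)
    (d0 : ν) (f : ν → ν) : (d.insert k v).modify k d0 f = d.insert k (f v) := by
  simp [PySem.Dict.modify, PySem.Dict.getD_insert_self, PySem.Dict.insert_insert_self]

-- A's interleaved fold equals B's merge fold fed with the two pure label streams
theorem fold_agree (rest : List (String × String × String)) :
    ∀ (d : PySem.Dict String (List String)) (s a : Int) (ob : String),
      (rest.foldl editStepA (d, s, a, ob)).1
        = (rest.foldl mergeStepB (d, sLabs rest s, aLabs rest ob a)).1 := by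
  induction rest with
  | nil => intro d s a ob; rfl
  | cons r rest ih =>
    intro d s a ob
    simp only [List.foldl_cons]
    by_cases hm : r.2.2 = "main"
    · simp [editStepA, mergeStepB, sLabs, aLabs, hm, modify_insert_self]
      exact ih (d.insert r.1 ["s" ++ PySem.Int.toStr s, r.2.1, "main"]) (s + 1) a ob
    · by_cases ho : r.2.2 = ob
      · subst ho
        simp [editStepA, mergeStepB, sLabs, aLabs, hm, modify_insert_self]
        exact ih (d.insert r.1 ["a" ++ PySem.Int.toStr a, r.2.1, r.2.2]) s (a + 1) r.2.2
      · simp [editStepA, mergeStepB, sLabs, aLabs, hm, ho, modify_insert_self]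
        exact ih (d.insert r.1 ["a" ++ PySem.Int.toStr 0, r.2.1, r.2.2]) s (0 + 1) r.2.2

-- ===== VERDICT (by name: the statement is the Claim_ definition above) =====
theorem edit_table_spec : Claim_equal_edit_table := by
  intro table _
  show edit_table table = edit_table_alt table
  unfold edit_table edit_table_alt
  rw [mainCount_foldl, aLabStepB_spec]
  have h := sLabs_eq_range table 0
  rw [zero_add] at h
  simp only [List.nil_append, zero_add]
  rw [h, fold_agree]
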